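-- pv_equiv track=rewrite | github.com/Devteam-geidi/FDA_email_classifier | src/app/agents/escalation.py | _build_flat_and_grouped
-- ===== SOURCE A (Python) =====
-- from typing import List, Dict, Tuple
--
-- def _build_flat_and_grouped(taxonomy: Dict[str, Dict]) -> Tuple[List[str], Dict[str, List[str]]]:
--     """
--     Builds:
--       - flat list of keys (sorted, includes 'other' fallback)
--       - grouped map: { "<Group>": [taxonomy_keys...] }
--     If no 'other' taxon exists in the YAML, we synthesize it under group "Other".
--     """
--     grouped: Dict[str, List[str]] = {}
--     flat: List[str] = []
--
--     for key, meta in taxonomy.items():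
--         grp = (meta or {}).get("group") or "Other"
--         grouped.setdefault(grp, []).append(key)
--         flat.append(key)
--
--     # ensure synthetic 'other' exists for safety
--     if "other" not in flat:
--         flat.append("other")
--         grouped.setdefault("Other", []).append("other")
--
--     # sort keys within each group and sort groups by name
--     for g in grouped:
--         grouped[g] = sorted(grouped[g])
--     flat = sorted(flat)
--
--     # ensure deterministic group order by recreating dict
--     grouped = dict(sorted(grouped.items(), key=lambda kv: kv[0].lower()))
--     return flat, grouped
-- ===== SOURCE B (Python) =====
-- def _build_flat_and_grouped(taxonomy):
--     def group_of(meta):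
--         return (meta or {}).get("group") or "Other"
--
--     synth = "other" not in taxonomy
--     flat = sorted(list(taxonomy) + (["other"] if synth else []))
--
--     # group names in first-occurrence order (the taxonomy's iteration order)
--     order = []
--     for meta in taxonomy.values():
--         g = group_of(meta)
--         if g not in order:
--             order.append(g)
--     if synth and "Other" not in order:
--         order.append("Other")
--
--     # one sorted member list per group, built by a direct per-group scan
--     items = [(g,
--               sorted([k for k, m in taxonomy.items() if group_of(m) == g]
--                      + (["other"] if synth and g == "Other" else [])))
--              for g in order]
--     grouped = dict(sorted(items, key=lambda kv: kv[0].lower()))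
--     return flat, grouped
-- ===== Notes on version B (the rewrite author's own statement) =====
-- stated objective: alternative
-- what changed: A builds flat and the grouped dict incrementally in one setdefault/append pass and then post-sorts every bucket, the flat list and the group items; B instead derives each piece directly: flat = sorted(keys + optional synthetic 'other'), the group order as a first-occurrence dedup list, and each group's sorted member list by an independent per-group scan in a comprehension, with no mutable dict being grown.
import Mathlib
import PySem

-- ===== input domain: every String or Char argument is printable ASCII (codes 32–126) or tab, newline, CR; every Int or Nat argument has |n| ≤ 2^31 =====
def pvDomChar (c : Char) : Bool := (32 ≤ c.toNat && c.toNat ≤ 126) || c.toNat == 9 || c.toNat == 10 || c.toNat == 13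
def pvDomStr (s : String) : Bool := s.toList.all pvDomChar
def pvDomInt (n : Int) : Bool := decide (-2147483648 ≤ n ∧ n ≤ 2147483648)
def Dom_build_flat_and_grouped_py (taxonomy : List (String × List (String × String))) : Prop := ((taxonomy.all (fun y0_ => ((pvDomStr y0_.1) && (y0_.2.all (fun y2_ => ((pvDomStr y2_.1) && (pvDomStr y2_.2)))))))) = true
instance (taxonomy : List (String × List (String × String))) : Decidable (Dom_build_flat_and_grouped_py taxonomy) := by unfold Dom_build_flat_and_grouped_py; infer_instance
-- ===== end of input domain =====

-- ===== PORT A =====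
-- B re-derives flat/group order/bucket contents directly instead of growing a mutable dict; same results, similar cost.

-- helper shared by both ports: `(meta or {}).get("group") or "Other"`
def pvGroupOf (m : List (String × String)) : String :=
  match (PySem.Dict.mk m).get? "group" with
  | some g => if g = "" then "Other" else g
  | none => "Other"

def build_flat_and_grouped_py (taxonomy : List (String × List (String × String))) : List String × (List (String × List String)) :=
  -- for key, meta in taxonomy.items(): grouped.setdefault(grp, []).append(key); flat.append(key)
  -- (setdefault(g, []).append(k) is exactly Dict.modify g [] (· ++ [k]))
  let st := taxonomy.foldl
    (fun (st : PySem.Dict String (List String) × List String) p =>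
      (st.1.modify (pvGroupOf p.2) [] (· ++ [p.1]), st.2 ++ [p.1]))
    (PySem.Dict.empty, [])
  let st := if st.2.contains "other" then st
            else (st.1.modify "Other" [] (· ++ ["other"]), st.2 ++ ["other"])
  -- for g in grouped: grouped[g] = sorted(grouped[g])  (in-place overwrite keeps positions: map over items is exact)
  let groupedItems := st.1.items.map (fun p => (p.1, PySem.List.sorted p.2 (fun x => x) false))
  let flat := PySem.List.sorted st.2 (fun x => x) false
  (flat, PySem.List.sorted groupedItems (fun kv => PySem.Str.lower kv.1) false)

-- ===== PORT B =====
def build_flat_and_grouped_py_alt (taxonomy : List (String × List (String × String))) : List String × (List (String × List String)) :=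
  let keys := taxonomy.map (fun p => p.1)
  let synth := !(keys.contains "other")
  let flat := PySem.List.sorted (keys ++ if synth then ["other"] else []) (fun x => x) false
  -- group names in first-occurrence order
  let order := taxonomy.foldl
    (fun (acc : List String) p =>
      let g := pvGroupOf p.2
      if acc.contains g then acc else acc ++ [g]) []
  let order := if synth && !(order.contains "Other") then order ++ ["Other"] else order
  let items := order.map (fun g =>
      (g, PySem.List.sorted
            (((taxonomy.filter (fun p => pvGroupOf p.2 == g)).map (fun p => p.1))
              ++ if synth && (g == "Other") then ["other"] else []) (fun x => x) false))
  (flat, PySem.List.sorted items (fun kv => PySem.Str.lower kv.1) false)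

-- ===== PRECONDITION & SPEC =====
def Spec_build_flat_and_grouped_py (taxonomy : List (String × List (String × String))) (out : List String × (List (String × List String))) : Prop := out = build_flat_and_grouped_py_alt taxonomy
instance (taxonomy : List (String × List (String × String))) (out : List String × (List (String × List String))) : Decidable (Spec_build_flat_and_grouped_py taxonomy out) := by unfold Spec_build_flat_and_grouped_py; infer_instance

-- ===== CLAIM (what is proved, stated in full; the proofs are below) =====
def Claim_equal_build_flat_and_grouped_py : Prop := ∀ (taxonomy : List (String × List (String × String))), Dom_build_flat_and_grouped_py taxonomy → Spec_build_flat_and_grouped_py taxonomy (build_flat_and_grouped_py taxonomy)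

-- ===== LEMMAS AND PROOFS =====

-- first-occurrence dedup fold (B's `order` loop, applied to the list of group names)
def pvFirsts (acc : List String) (gs : List String) : List String :=
  gs.foldl (fun acc g => if acc.contains g then acc else acc ++ [g]) acc

-- members of a group, in taxonomy order (A's bucket contents before sorting)
def pvBucket (l : List (String × List (String × String))) (g : String) : List String :=
  (l.filter (fun p => pvGroupOf p.2 == g)).map (fun p => p.1)

theorem pvFirsts_append (acc gs : List String) (g : String) :
    pvFirsts acc (gs ++ [g]) =
      (if (pvFirsts acc gs).contains g then pvFirsts acc gs else pvFirsts acc gs ++ [g]) := by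
  simp [pvFirsts]

theorem pvFirsts_cons (acc : List String) (g : String) (gs : List String) :
    pvFirsts acc (g :: gs) = pvFirsts (if acc.contains g then acc else acc ++ [g]) gs := by
  by_cases h : acc.contains g <;> simp [pvFirsts]

theorem mem_pvFirsts (acc gs : List String) (a : String) :
    a ∈ pvFirsts acc gs ↔ a ∈ acc ∨ a ∈ gs := by
  induction gs generalizing acc with
  | nil => simp [pvFirsts]
  | cons g t ih =>
    rw [pvFirsts_cons]
    by_cases h : g ∈ acc
    · simp only [List.contains_eq_mem, h, decide_true, if_true, ih, List.mem_cons]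
      constructor
      · rintro (h1 | h1) <;> tauto
      · rintro (h1 | h1 | h1) <;> simp_all
    · simp only [List.contains_eq_mem, h, decide_false, if_false, ih, List.mem_append,
        List.mem_cons, Bool.false_eq_true]
      tauto

theorem nodup_pvFirsts (acc gs : List String) (h : acc.Nodup) : (pvFirsts acc gs).Nodup := by
  induction gs generalizing acc with
  | nil => simpa [pvFirsts]
  | cons g t ih =>
    rw [pvFirsts_cons]
    by_cases hg : g ∈ acc
    · simpa [hg] using ih acc h
    · have hn : (acc ++ [g]).Nodup := by
        rw [List.nodup_append]
        refine ⟨h, List.nodup_singleton g, ?_⟩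
        intro a ham b hb heq
        simp only [List.mem_singleton] at hb
        exact hg ((heq.trans hb) ▸ ham)
      simpa [hg] using ih (acc ++ [g]) hn

theorem pvBucket_append (l : List (String × List (String × String))) (p : String × List (String × String)) (g : String) :
    pvBucket (l ++ [p]) g = pvBucket l g ++ (if pvGroupOf p.2 == g then [p.1] else []) := by
  by_cases h : pvGroupOf p.2 = g <;> simp [pvBucket, List.filter_append, h]

theorem pvBucket_nil_of_not_mem (l : List (String × List (String × String))) (g : String)
    (h : g ∉ l.map (fun p => pvGroupOf p.2)) : pvBucket l g = [] := by
  simp only [pvBucket, List.map_eq_nil_iff, List.filter_eq_nil_iff]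
  intro p hp hbeq
  exact h (List.mem_map.mpr ⟨p, hp, by simpa using hbeq⟩)

-- items of A's setdefault/append step, on a dict whose items are a value-map over a nodup key list
theorem pv_modify_items_char (d : PySem.Dict String (List String)) (F : List String)
    (v : String → List String) (a x : String) (hF : F.Nodup)
    (hi : d.items = F.map (fun g => (g, v g))) (ha : a ∉ F → v a = []) :
    (d.modify a [] (· ++ [x])).items =
      (if F.contains a then F else F ++ [a]).map
        (fun g => (g, v g ++ if g == a then [x] else [])) := by
  have hmod : d.modify a [] (· ++ [x]) = d.insert a (d.getD a [] ++ [x]) := by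
    simp [PySem.Dict.modify]
  have hkeys : d.keys = F := by
    simp [PySem.Dict.keys, hi, Function.comp_def]
  have hknd : d.keys.Nodup := by rw [hkeys]; exact hF
  by_cases hmem : a ∈ F
  · have hcont : d.contains a = true := by
      rw [PySem.Dict.contains_iff_mem_keys, hkeys]; exact hmem
    have hgd : d.getD a [] = v a :=
      PySem.Dict.getD_of_mem_items d (by rw [hi]; exact List.mem_map.mpr ⟨a, hmem, rfl⟩) hknd []
    rw [hmod, PySem.Dict.items_insert_of_contains d _ hcont, hi, hgd]
    simp only [List.contains_eq_mem, hmem, decide_true, if_true, List.map_map]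
    refine List.map_congr_left (fun g hg => ?_)
    by_cases hga : g = a <;> simp [Function.comp, hga]
  · have hcont : d.contains a = false := by
      rw [Bool.eq_false_iff]
      intro hc
      exact hmem (by rw [← hkeys]; exact (PySem.Dict.contains_iff_mem_keys _ _).mp hc)
    have hgd : d.getD a [] = [] := PySem.Dict.getD_of_not_contains d [] hcont
    rw [hmod, PySem.Dict.items_insert_of_not_contains d _ hcont, hi, hgd,
      if_neg (by simp [hmem]), List.map_append]
    congr 1
    · refine List.map_congr_left (fun g hg => ?_)
      have hga : ¬ (g = a) := fun h => hmem (h ▸ hg)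
      simp [hga]
    · simp [ha hmem]

-- characterisation of A's main loop
theorem pv_fold_char (l : List (String × List (String × String))) :
    l.foldl
      (fun (st : PySem.Dict String (List String) × List String) p =>
        (st.1.modify (pvGroupOf p.2) [] (· ++ [p.1]), st.2 ++ [p.1]))
      (PySem.Dict.empty, [])
    = (PySem.Dict.mk ((pvFirsts [] (l.map (fun p => pvGroupOf p.2))).map
        (fun g => (g, pvBucket l g))), l.map (fun p => p.1)) := by
  induction l using List.reverseRecOn with
  | nil => simp [pvFirsts, pvBucket, PySem.Dict.empty]
  | append_singleton l p ih =>
    rw [List.foldl_append, ih]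
    simp only [List.foldl_cons, List.foldl_nil, Prod.mk.injEq]
    refine ⟨?_, by simp⟩
    apply PySem.Dict.ext
    have hF : (pvFirsts [] (l.map (fun q => pvGroupOf q.2))).Nodup :=
      nodup_pvFirsts _ _ List.nodup_nil
    have hchar := pv_modify_items_char
      (PySem.Dict.mk ((pvFirsts [] (l.map (fun q => pvGroupOf q.2))).map
        (fun g => (g, pvBucket l g))))
      (pvFirsts [] (l.map (fun q => pvGroupOf q.2))) (pvBucket l) (pvGroupOf p.2) p.1 hF rfl
      (fun hnm => pvBucket_nil_of_not_mem l _
        (fun hm => hnm ((mem_pvFirsts _ _ _).mpr (Or.inr hm))))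
    rw [hchar,
      show (l ++ [p]).map (fun q => pvGroupOf q.2)
        = l.map (fun q => pvGroupOf q.2) ++ [pvGroupOf p.2] by simp,
      pvFirsts_append]
    by_cases hc : (pvFirsts [] (l.map (fun q => pvGroupOf q.2))).contains (pvGroupOf p.2) <;>
      · simp only [hc, if_true, if_false, Bool.false_eq_true]
        refine List.map_congr_left (fun g hg => ?_)
        rw [pvBucket_append]
        rcases eq_or_ne g (pvGroupOf p.2) with hga | hga
        · simp [hga]
        · simp [hga, hga.symm]

theorem pv_order_fold (taxonomy : List (String × List (String × String))) :
    taxonomy.foldl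
      (fun (acc : List String) p =>
        let g := pvGroupOf p.2
        if acc.contains g then acc else acc ++ [g]) []
    = pvFirsts [] (taxonomy.map (fun q => pvGroupOf q.2)) := by
  rw [pvFirsts, List.foldl_map]

-- ===== VERDICT (by name: the statement is the Claim_ definition above) =====
theorem build_flat_and_grouped_py_spec : Claim_equal_build_flat_and_grouped_py := by
  intro taxonomy _
  unfold Spec_build_flat_and_grouped_py build_flat_and_grouped_py build_flat_and_grouped_py_alt
  rw [pv_fold_char, pv_order_fold]
  dsimp only
  by_cases hot : (taxonomy.map (fun p => p.1)).contains "other"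
  · rw [if_pos hot]
    simp only [hot, Bool.not_true, Bool.false_and, Bool.false_eq_true, if_false,
      List.append_nil]
    simp [pvBucket, Function.comp_def]
  · have hF : (pvFirsts [] (taxonomy.map (fun q => pvGroupOf q.2))).Nodup :=
      nodup_pvFirsts _ _ List.nodup_nil
    have hchar := pv_modify_items_char
      (PySem.Dict.mk ((pvFirsts [] (taxonomy.map (fun q => pvGroupOf q.2))).map
        (fun g => (g, pvBucket taxonomy g))))
      (pvFirsts [] (taxonomy.map (fun q => pvGroupOf q.2))) (pvBucket taxonomy)
      "Other" "other" hF rfl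
      (fun hnm => pvBucket_nil_of_not_mem taxonomy _
        (fun hm => hnm ((mem_pvFirsts _ _ _).mpr (Or.inr hm))))
    rw [if_neg hot]
    dsimp only
    rw [hchar]
    rw [Bool.not_eq_true] at hot
    simp only [hot, Bool.not_false, Bool.true_and, if_true]
    simp [pvBucket, Function.comp_def]
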